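-- pv_equiv track=rewrite | github.com/elifesciences/sciencebeam-gym | sciencebeam_gym/preprocess/blockify_annotations.py | extend_color_map_for_tags
-- ===== SOURCE A (Python) =====
-- def extend_color_map_for_tags(color_map, tags):
--     updated_color_map = dict(color_map)
--     for tag in tags:
--         if tag not in updated_color_map:
--             updated_color_map[tag] = (
--                 max(updated_color_map.values()) + 1 if len(updated_color_map) > 0 else 1
--             )
--     return updated_color_map
-- ===== SOURCE B (Python) =====
-- def extend_color_map_for_tags(color_map, tags):
--     result = dict(color_map)
--     base = max(result.values()) if result else 0
--     seen = set(result)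
--     new_tags = []
--     for tag in tags:
--         if tag not in seen:
--             new_tags.append(tag)
--             seen.add(tag)
--     for i, tag in enumerate(new_tags):
--         result[tag] = base + i + 1
--     return result
-- ===== Notes on version B (the rewrite author's own statement) =====
-- stated objective: faster
-- what changed: B computes the current maximum color once up front, collects the new tags in a separate dedup/filter pass, and assigns base+i+1 by an enumerate pass, instead of A's single scan that recomputes max(values()) at every insertion.
import Mathlib
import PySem

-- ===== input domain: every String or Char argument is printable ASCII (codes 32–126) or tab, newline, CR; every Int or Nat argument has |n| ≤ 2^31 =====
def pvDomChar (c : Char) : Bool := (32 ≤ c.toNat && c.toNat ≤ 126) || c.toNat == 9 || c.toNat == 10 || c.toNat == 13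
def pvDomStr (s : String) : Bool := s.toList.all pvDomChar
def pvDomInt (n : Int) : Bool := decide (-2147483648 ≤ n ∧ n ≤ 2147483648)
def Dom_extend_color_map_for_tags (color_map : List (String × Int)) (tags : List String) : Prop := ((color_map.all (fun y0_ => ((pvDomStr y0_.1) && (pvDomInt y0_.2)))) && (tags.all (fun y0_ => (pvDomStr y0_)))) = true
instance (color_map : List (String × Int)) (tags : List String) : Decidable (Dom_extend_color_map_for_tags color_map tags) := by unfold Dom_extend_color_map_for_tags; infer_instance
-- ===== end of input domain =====

-- B computes the base color once and assigns base+i+1 to the i-th new tag (one dedup pass, one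
-- enumerate pass) instead of recomputing max(values()) inside the loop; same return value.

-- ===== PORT A =====
def extend_color_map_for_tags (color_map : List (String × Int)) (tags : List String) : List (String × Int) :=
  let d0 : PySem.Dict String Int := PySem.Dict.ofList color_map
  (tags.foldl (fun (d : PySem.Dict String Int) tag =>
      if d.contains tag then d
      else d.insert tag (if d.size > 0 then (PySem.List.max? d.values (fun v => v)).getD 0 + 1 else 1)) d0).items

-- ===== PORT B =====
def extend_color_map_for_tags_alt (color_map : List (String × Int)) (tags : List String) : List (String × Int) :=
  let result : PySem.Dict String Int := PySem.Dict.ofList color_map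
  let base : Int := if result.size > 0 then (PySem.List.max? result.values (fun v => v)).getD 0 else 0
  let st := tags.foldl (fun (st : List String × List String) tag =>
      if st.2.contains tag then st else (st.1 ++ [tag], PySem.Set.add st.2 tag))
    ([], PySem.Set.ofList result.keys)
  ((PySem.List.enumerate st.1 0).foldl (fun (d : PySem.Dict String Int) p =>
      d.insert p.2 (base + p.1 + 1)) result).items

-- ===== PRECONDITION & SPEC =====
def Spec_extend_color_map_for_tags (color_map : List (String × Int)) (tags : List String) (out : List (String × Int)) : Prop := out = extend_color_map_for_tags_alt color_map tags
instance (color_map : List (String × Int)) (tags : List String) (out : List (String × Int)) : Decidable (Spec_extend_color_map_for_tags color_map tags out) := by unfold Spec_extend_color_map_for_tags; infer_instance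

-- ===== CLAIM (what is proved, stated in full; the proofs are below) =====
def Claim_equal_extend_color_map_for_tags : Prop := ∀ (color_map : List (String × Int)) (tags : List String), Dom_extend_color_map_for_tags color_map tags → Spec_extend_color_map_for_tags color_map tags (extend_color_map_for_tags color_map tags)

-- ===== LEMMAS AND PROOFS =====

-- the base color: max of the values, 0 for the empty dict
def pvBase (d : PySem.Dict String Int) : Int :=
  if d.size > 0 then (PySem.List.max? d.values (fun v => v)).getD 0 else 0

-- A's per-step state update
def pvStepA (d : PySem.Dict String Int) (tag : String) : PySem.Dict String Int :=
  if d.contains tag then d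
  else d.insert tag (if d.size > 0 then (PySem.List.max? d.values (fun v => v)).getD 0 + 1 else 1)

-- the list of genuinely new tags, in first-occurrence order
def pvNew (seen : List String) : List String → List String
  | [] => []
  | tag :: rest => if seen.contains tag then pvNew seen rest else tag :: pvNew (tag :: seen) rest

-- B's second loop, recursively (s = running enumerate index)
def pvAssign (d : PySem.Dict String Int) (b s : Int) : List String → PySem.Dict String Int
  | [] => d
  | tag :: rest => pvAssign (d.insert tag (b + s + 1)) b (s + 1) rest

theorem pvNew_congr (s1 s2 : List String) (h : ∀ x, s1.contains x = s2.contains x) :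
    ∀ tags, pvNew s1 tags = pvNew s2 tags := by
  intro tags
  induction tags generalizing s1 s2 with
  | nil => rfl
  | cons t rest ih =>
    show (if s1.contains t then pvNew s1 rest else t :: pvNew (t :: s1) rest)
        = (if s2.contains t then pvNew s2 rest else t :: pvNew (t :: s2) rest)
    rw [h t]
    by_cases hc : s2.contains t = true
    · rw [if_pos hc, if_pos hc]; exact ih _ _ h
    · rw [if_neg hc, if_neg hc]
      exact congrArg (t :: ·) (ih _ _ (fun x => by simp only [List.contains_cons, h x]))

theorem pvAssign_shift (l : List String) : ∀ (d : PySem.Dict String Int) (b s : Int),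
    pvAssign d b (s + 1) l = pvAssign d (b + 1) s l := by
  induction l with
  | nil => intro d b s; rfl
  | cons t rest ih =>
    intro d b s
    simp only [pvAssign]
    rw [show b + (s + 1) + 1 = b + 1 + s + 1 by ring, ih]

theorem pvAssign_enumerate (l : List String) : ∀ (d : PySem.Dict String Int) (b s : Int),
    (PySem.List.enumerate l s).foldl (fun d p => d.insert p.2 (b + p.1 + 1)) d
      = pvAssign d b s l := by
  induction l with
  | nil => intro d b s; rfl
  | cons t rest ih =>
    intro d b s
    rw [PySem.List.enumerate_cons]
    simp only [List.foldl_cons, pvAssign]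
    exact ih _ _ _

theorem pvBase_isMax (d : PySem.Dict String Int) : ∀ v ∈ d.values, v ≤ pvBase d := by
  intro v hv
  unfold pvBase
  have hne : d.values ≠ [] := by intro hh; rw [hh] at hv; simp at hv
  have hsz : d.size > 0 := by
    simp only [PySem.Dict.size, PySem.Dict.values] at *
    cases h : d.items with
    | nil => rw [h] at hne; simp at hne
    | cons a l => exact Nat.succ_pos l.length
  rw [if_pos hsz]
  obtain ⟨m, hm⟩ : ∃ m, PySem.List.max? d.values (fun v => v) = some m := by
    cases h : PySem.List.max? d.values (fun v => v) with
    | none => exact absurd ((PySem.List.max?_eq_none_iff d.values (fun v => v)).mp h) hne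
    | some m => exact ⟨m, rfl⟩
  rw [hm]
  exact PySem.List.max?_isMax hm v hv

theorem pvBase_insert_fresh (d : PySem.Dict String Int) (tag : String)
    (h : d.contains tag = false) :
    pvBase (d.insert tag (pvBase d + 1)) = pvBase d + 1 := by
  set b := pvBase d with hb
  have hitems := PySem.Dict.items_insert_of_not_contains d (b + 1) h
  have hvals : (d.insert tag (b + 1)).values = d.values ++ [b + 1] := by
    simp only [PySem.Dict.values, hitems, List.map_append, List.map_cons, List.map_nil]
  show (if (d.insert tag (b + 1)).size > 0
      then (PySem.List.max? (d.insert tag (b + 1)).values (fun v => v)).getD 0 else 0) = b + 1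
  rw [hvals]
  have hsz : (d.insert tag (b + 1)).size > 0 := by
    simp only [PySem.Dict.size, hitems, List.length_append, List.length_cons, List.length_nil]; omega
  rw [if_pos hsz]
  cases hv : d.values with
  | nil => simp [PySem.List.max?_id_cons]
  | cons x t =>
    have hrw : PySem.List.max? ((x :: t) ++ [b + 1]) (fun v => v)
        = some ((t ++ [b + 1]).foldl max x) := by
      rw [List.cons_append, PySem.List.max?_id_cons]
    rw [hrw, List.foldl_append]
    have hmax : t.foldl max x ≤ b := by
      have hmem : t.foldl max x ∈ d.values := by
        rw [hv]; exact PySem.List.max?_mem (PySem.List.max?_id_cons x t)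
      exact pvBase_isMax d _ hmem
    simp only [List.foldl_cons, List.foldl_nil, Option.getD_some]
    omega

theorem pvStepA_value (d : PySem.Dict String Int) (tag : String) (h : d.contains tag = false) :
    pvStepA d tag = d.insert tag (pvBase d + 1) := by
  unfold pvStepA pvBase
  rw [if_neg (by rw [h]; simp)]
  by_cases hsz : d.size > 0
  · rw [if_pos hsz, if_pos hsz]
  · rw [if_neg hsz, if_neg hsz]; norm_num

theorem pv_main (tags : List String) : ∀ (d : PySem.Dict String Int), d.keys.Nodup →
    tags.foldl pvStepA d = pvAssign d (pvBase d) 0 (pvNew d.keys tags) := by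
  induction tags with
  | nil => intro d _; rfl
  | cons tag rest ih =>
    intro d hnd
    simp only [List.foldl_cons, pvNew]
    by_cases hc : d.contains tag = true
    · rw [show pvStepA d tag = d by unfold pvStepA; rw [if_pos hc]]
      have hk : d.keys.contains tag = true :=
        List.contains_iff_mem.mpr ((PySem.Dict.contains_iff_mem_keys d tag).mp hc)
      rw [if_pos hk]
      exact ih d hnd
    · have hc' : d.contains tag = false := by simpa using hc
      have hk : d.keys.contains tag = false := by
        rw [Bool.eq_false_iff]
        intro hmem
        exact hc ((PySem.Dict.contains_iff_mem_keys d tag).mpr (List.contains_iff_mem.mp hmem))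
      rw [if_neg (by rw [hk]; simp), pvStepA_value d tag hc']
      have hnd' : (d.insert tag (pvBase d + 1)).keys.Nodup :=
        PySem.Dict.nodup_keys_insert d tag _ hnd
      rw [ih _ hnd', pvBase_insert_fresh d tag hc']
      have hkeyeq : pvNew (d.insert tag (pvBase d + 1)).keys rest
          = pvNew (tag :: d.keys) rest := by
        refine pvNew_congr _ _ (fun x => ?_) rest
        rw [PySem.Dict.keys_insert_of_not_contains d _ hc']
        rw [Bool.eq_iff_iff]
        simp only [List.contains_iff_mem, List.mem_append, List.mem_cons]
        tauto
      rw [hkeyeq]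
      simp only [pvAssign]
      rw [pvAssign_shift]
      norm_num

theorem pvPair_fold (tags : List String) : ∀ (acc seen : List String),
    (tags.foldl (fun (st : List String × List String) tag =>
        if st.2.contains tag then st else (st.1 ++ [tag], PySem.Set.add st.2 tag)) (acc, seen)).1
      = acc ++ pvNew seen tags := by
  induction tags with
  | nil => intro acc seen; simp [pvNew]
  | cons tag rest ih =>
    intro acc seen
    simp only [List.foldl_cons, pvNew]
    by_cases hc : seen.contains tag = true
    · rw [if_pos hc, if_pos hc, ih]
    · rw [if_neg hc, if_neg hc, ih]
      rw [show acc ++ tag :: pvNew (tag :: seen) rest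
          = (acc ++ [tag]) ++ pvNew (tag :: seen) rest by simp]
      congr 1
      refine pvNew_congr _ _ (fun x => ?_) rest
      rw [Bool.eq_iff_iff]
      simp only [List.contains_iff_mem, List.mem_cons]
      rw [PySem.Set.mem_add seen tag x]
      tauto

-- ===== VERDICT (by name: the statement is the Claim_ definition above) =====
theorem extend_color_map_for_tags_spec : Claim_equal_extend_color_map_for_tags := by
  intro color_map tags _
  unfold Spec_extend_color_map_for_tags extend_color_map_for_tags extend_color_map_for_tags_alt
  simp only []
  have hnd : (PySem.Dict.ofList color_map).keys.Nodup := PySem.Dict.nodup_keys_ofList color_map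
  have hseen : ∀ x, (PySem.Set.ofList (PySem.Dict.ofList (ν := Int) color_map).keys).contains x
      = (PySem.Dict.ofList (ν := Int) color_map).keys.contains x := by
    intro x
    rw [Bool.eq_iff_iff]
    constructor
    · intro hx
      exact List.contains_iff_mem.mpr
        ((PySem.Set.mem_ofList _ x).mp (List.contains_iff_mem.mp hx))
    · intro hx
      exact List.contains_iff_mem.mpr
        ((PySem.Set.mem_ofList _ x).mpr (List.contains_iff_mem.mp hx))
  rw [pvPair_fold tags [] (PySem.Set.ofList (PySem.Dict.ofList color_map).keys), List.nil_append]
  rw [pvNew_congr _ _ hseen tags]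
  rw [pvAssign_enumerate]
  have hstep : (fun (d : PySem.Dict String Int) tag =>
      if d.contains tag then d
      else d.insert tag (if d.size > 0 then (PySem.List.max? d.values (fun v => v)).getD 0 + 1 else 1))
      = pvStepA := by
    funext d tag; rfl
  rw [hstep, pv_main tags (PySem.Dict.ofList color_map) hnd]
  rfl
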